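-- pv_equiv track=rewrite | github.com/Adam0s007/DSA | dynamic programming/zadania Szymona/zad9k.py | prom
-- ===== SOURCE A (Python) =====
-- def f(T,DP,i,l1,l2):
--     if i > len(T)-1: return 0
--     if DP[i][l1][l2] != -1: return DP[i][l1][l2]
--     if T[i] > l1 and T[i] > l2:
--         DP[i][l1][l2] = 0
--         return 0
--
--     if T[i] > l1:
--         DP[i][l1][l2] = f(T,DP,i+1,l1,l2-T[i]) + 1
--     elif T[i] > l2:
--         DP[i][l1][l2] = f(T,DP,i+1,l1-T[i],l2) + 1
--     else:
--         w1 = f(T,DP,i+1,l1-T[i],l2)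
--         w2 = f(T,DP,i+1,l1,l2-T[i])
--         DP[i][l1][l2] = max(w1,w2) + 1
--     return DP[i][l1][l2]
--
-- def prom(P, g, d):
--     DP  = [[[-1 for i in range(d+1)] for i in range(g+1)] for i in range(len(P))]
--     l2 = d
--     l1 = g
--     w = f(P,DP,0,g,d)
--
--     i = 0
--     sol = []
--     sol2 = []
--     while i < len(P) and (l1 >= P[i] or l2 >= P[i]):
--         if P[i] > l1 and P[i] > l2:
--             w1 = 0
--             w2 = 0
--         elif P[i] > l1:
--             w1 = 0
--             w2 =1
--         elif P[i] > l2: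
--             w1 = 1
--             w2 = 0
--         else:
--             w1 = f(P,DP,i+1,l1-P[i],l2)
--             w2 = f(P,DP,i+1,l1,l2-P[i])
--         if w1 > w2:
--             sol.append(i)
--             l1 = l1 - P[i]
--         else:
--             sol2.append(i)
--             l2 = l2 - P[i]
--         i+=1
--     if w-1 in sol:#pojazd ostatni ktory wjechal to liczba wszystkich pojazdow minus 1
--         return sol
--     else:
--         return sol2
-- ===== SOURCE B (Python) =====
-- # Bottom-up iterative DP (explicit table of suffix layers built back-to-front)
-- # instead of A's top-down memoized recursion; reconstruction reads the table directly.
-- def _cell(p, l1, l2, nx):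
--     b = 0
--     if p <= l1:
--         b = nx[l1 - p][l2] + 1
--     if p <= l2:
--         c = nx[l1][l2 - p] + 1
--         if c > b:
--             b = c
--     return b
--
-- def prom(P, g, d):
--     n = len(P)
--     layers = [[[0] * (d + 1) for _ in range(g + 1)]]
--     for p in reversed(P):
--         nx = layers[0]
--         cur = [[_cell(p, l1, l2, nx) for l2 in range(d + 1)] for l1 in range(g + 1)]
--         layers.insert(0, cur)
--     w = layers[0][g][d]
--     l1, l2 = g, d
--     sol, sol2 = [], []
--     i = 0
--     while i < n and (l1 >= P[i] or l2 >= P[i]):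
--         p = P[i]
--         nx = layers[i + 1]
--         w1 = nx[l1 - p][l2] + 1 if p <= l1 else 0
--         w2 = nx[l1][l2 - p] + 1 if p <= l2 else 0
--         if w1 > w2:
--             sol.append(i)
--             l1 -= p
--         else:
--             sol2.append(i)
--             l2 -= p
--         i += 1
--     return sol if w - 1 in sol else sol2
-- ===== Notes on version B (the rewrite author's own statement) =====
-- stated objective: alternative
-- what changed: A's top-down memoized recursion f with a mutable -1-initialised 3D memo is replaced by an iterative bottom-up fill of suffix layers (built back-to-front), and the reconstruction walk reads the table directly instead of re-calling f.
-- outside the precondition, e.g. on prom([-1], 0, 0): A returns [0], B raises IndexError; on prom([], -1, 0): A returns [], B raises IndexError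
import Mathlib
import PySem

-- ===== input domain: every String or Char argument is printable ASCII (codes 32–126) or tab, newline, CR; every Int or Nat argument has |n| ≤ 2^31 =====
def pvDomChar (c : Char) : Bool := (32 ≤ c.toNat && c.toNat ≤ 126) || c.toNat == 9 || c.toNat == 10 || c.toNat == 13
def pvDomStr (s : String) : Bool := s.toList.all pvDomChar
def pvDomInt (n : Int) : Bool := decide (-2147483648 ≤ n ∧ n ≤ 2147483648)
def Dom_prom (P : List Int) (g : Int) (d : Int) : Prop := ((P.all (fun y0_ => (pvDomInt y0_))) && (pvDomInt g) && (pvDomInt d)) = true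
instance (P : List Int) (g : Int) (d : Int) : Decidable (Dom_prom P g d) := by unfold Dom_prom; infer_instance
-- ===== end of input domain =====

-- B replaces A's top-down memoized recursion by an iterative bottom-up table of suffix
-- layers built back-to-front; the reconstruction walk reads the table instead of calling f.


-- B replaces A's top-down memoized recursion (f with a mutable -1-initialised 3D memo)
-- by an iterative bottom-up table of suffix layers built back-to-front; the
-- reconstruction walk reads the table directly instead of re-calling f.

-- ===== PORT A =====
-- DP is the mutable 3D memo list of A; all indices are non-negative inside Pre_prom,
-- so .toNat is exact there (out-of-range reads return the defaults, never hit on Pre_).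

def dpGet (DP : List (List (List Int))) (i a b : Nat) : Int :=
  ((DP.getD i []).getD a []).getD b (-1)
def dpSet (DP : List (List (List Int))) (i a b : Nat) (v : Int) : List (List (List Int)) :=
  DP.set i ((DP.getD i []).set a (((DP.getD i []).getD a []).set b v))

-- the memoized recursion f(T, DP, i, l1, l2), threading the mutated memo; the fuel
-- only makes the recursion structural and is always supplied large enough to be unreachable.

def fA (T : List Int) : Nat → List (List (List Int)) → Int → Int → Int →
    List (List (List Int)) × Int
  | 0, DP, _, _, _ => (DP, 0)
  | fuel+1, DP, i, l1, l2 =>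
    if i > (T.length : Int) - 1 then (DP, 0)
    else
      let m := dpGet DP i.toNat l1.toNat l2.toNat
      if m ≠ -1 then (DP, m)
      else
        let Ti := T.getD i.toNat 0
        if Ti > l1 ∧ Ti > l2 then (dpSet DP i.toNat l1.toNat l2.toNat 0, 0)
        else if Ti > l1 then
          let r := fA T fuel DP (i+1) l1 (l2 - Ti)
          (dpSet r.1 i.toNat l1.toNat l2.toNat (r.2 + 1), r.2 + 1)
        else if Ti > l2 then
          let r := fA T fuel DP (i+1) (l1 - Ti) l2
          (dpSet r.1 i.toNat l1.toNat l2.toNat (r.2 + 1), r.2 + 1)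
        else
          let r1 := fA T fuel DP (i+1) (l1 - Ti) l2
          let r2 := fA T fuel r1.1 (i+1) l1 (l2 - Ti)
          let v := max r1.2 r2.2 + 1
          (dpSet r2.1 i.toNat l1.toNat l2.toNat v, v)

-- the while-loop of prom; fuel = P.length bounds the iteration count exactly
-- (i starts at 0 and increases by 1 each pass, the loop stops at i = len(P)).

def reconA (T : List Int) : Nat → List (List (List Int)) → Int → Int → Int →
    List Int → List Int → List Int × List Int
  | 0, _, _, _, _, sol, sol2 => (sol, sol2)
  | k+1, DP, i, l1, l2, sol, sol2 =>
    let p := T.getD i.toNat 0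
    if i < (T.length : Int) ∧ (l1 ≥ p ∨ l2 ≥ p) then
      let s :=
        if p > l1 ∧ p > l2 then (DP, 0, 0)
        else if p > l1 then (DP, 0, 1)
        else if p > l2 then (DP, 1, 0)
        else
          let r1 := fA T (T.length + 1) DP (i+1) (l1 - p) l2
          let r2 := fA T (T.length + 1) r1.1 (i+1) l1 (l2 - p)
          (r2.1, r1.2, r2.2)
      if s.2.1 > s.2.2 then reconA T k s.1 (i+1) (l1 - p) l2 (sol ++ [i]) sol2
      else reconA T k s.1 (i+1) l1 (l2 - p) sol (sol2 ++ [i])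
    else (sol, sol2)

def prom (P : List Int) (g : Int) (d : Int) : List Int :=
  let DP0 := List.replicate P.length
      (List.replicate (g+1).toNat (List.replicate (d+1).toNat (-1)))
  let r := fA P (P.length + 1) DP0 0 g d
  let w := r.2
  let s := reconA P P.length r.1 0 g d [] []
  if w - 1 ∈ s.1 then s.1 else s.2

-- ===== PORT B =====

def lget2 (nx : List (List Int)) (a b : Int) : Int :=
  (nx.getD a.toNat []).getD b.toNat 0

def cellB (p l1 l2 : Int) (nx : List (List Int)) : Int :=
  let b := if p ≤ l1 then lget2 nx (l1 - p) l2 + 1 else 0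
  if p ≤ l2 then
    let c := lget2 nx l1 (l2 - p) + 1
    if c > b then c else b
  else b

def layerB (p g d : Int) (nx : List (List Int)) : List (List Int) :=
  (List.range (g+1).toNat).map fun l1 =>
    (List.range (d+1).toNat).map fun l2 => cellB p (Int.ofNat l1) (Int.ofNat l2) nx

def reconB (P : List Int) (layers : List (List (List Int))) :
    Nat → Int → Int → Int → List Int → List Int → List Int × List Int
  | 0, _, _, _, sol, sol2 => (sol, sol2)
  | k+1, i, l1, l2, sol, sol2 =>
    let p := P.getD i.toNat 0
    if i < (P.length : Int) ∧ (l1 ≥ p ∨ l2 ≥ p) then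
      let nx := layers.getD (i.toNat + 1) []
      let w1 := if p ≤ l1 then lget2 nx (l1 - p) l2 + 1 else 0
      let w2 := if p ≤ l2 then lget2 nx l1 (l2 - p) + 1 else 0
      if w1 > w2 then reconB P layers k (i+1) (l1 - p) l2 (sol ++ [i]) sol2
      else reconB P layers k (i+1) l1 (l2 - p) sol (sol2 ++ [i])
    else (sol, sol2)

def prom_alt (P : List Int) (g : Int) (d : Int) : List Int :=
  let nx0 := List.replicate (g+1).toNat (List.replicate (d+1).toNat 0)
  -- the reversed(P) loop prepending a freshly built layer is exactly a foldr
  let layers := P.foldr (fun p ls => layerB p g d (ls.headD []) :: ls) [nx0]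
  let w := lget2 (layers.headD []) g d
  let s := reconB P layers P.length 0 g d [] []
  if w - 1 ∈ s.1 then s.1 else s.2

-- ===== PRECONDITION & SPEC =====
-- Pre_ restricts to the natural domain of the ferry-loading problem (non-negative lane
-- capacities and vehicle lengths): outside it A's DP indexing mostly raises IndexError
-- (negative-index wraparound / empty DP dimensions) and B raises IndexError too; on the
-- few such inputs where A still returns (e.g. a trailing negative length), its value is
-- an accident of negative-index wraparound on the memo table.
def Pre_prom (P : List Int) (g : Int) (d : Int) : Prop :=
  0 ≤ g ∧ 0 ≤ d ∧ ∀ p ∈ P, 0 ≤ p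
instance (P : List Int) (g : Int) (d : Int) : Decidable (Pre_prom P g d) := by
  unfold Pre_prom; infer_instance

def pvWitness_prom : List Int × Int × Int := ([2, 3, 1], 3, 3)

def Spec_prom (P : List Int) (g : Int) (d : Int) (out : List Int) : Prop := out = prom_alt P g d
instance (P : List Int) (g : Int) (d : Int) (out : List Int) : Decidable (Spec_prom P g d out) := by unfold Spec_prom; infer_instance

-- ===== CLAIM (what is proved, stated in full; the proofs are below) =====
def Claim_equal_prom : Prop := ∀ (P : List Int) (g : Int) (d : Int), Dom_prom P g d → Pre_prom P g d → Spec_prom P g d (prom P g d)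

-- ===== LEMMAS AND PROOFS =====

-- the common pure value function: the value of A's f / the content of B's table cells

def F : List Int → Int → Int → Int
  | [], _, _ => 0
  | p :: r, l1, l2 =>
    if p > l1 ∧ p > l2 then 0
    else if p > l1 then F r l1 (l2 - p) + 1
    else if p > l2 then F r (l1 - p) l2 + 1
    else max (F r (l1 - p) l2) (F r l1 (l2 - p)) + 1

lemma F_nonneg (rest : List Int) (l1 l2 : Int) : 0 ≤ F rest l1 l2 := by
  induction rest generalizing l1 l2 with
  | nil => simp [F]
  | cons p r ih =>
    simp only [F]
    split_ifs with h1 h2 h3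
    · omega
    · have := ih l1 (l2 - p); omega
    · have := ih (l1 - p) l2; omega
    · have a := ih (l1 - p) l2; have b := ih l1 (l2 - p)
      have : F r (l1 - p) l2 ≤ max (F r (l1 - p) l2) (F r l1 (l2 - p)) := le_max_left _ _
      omega

-- memo coherence: every cell of A's memo is untouched (-1) or holds the pure value

def Coh (T : List Int) (DP : List (List (List Int))) : Prop :=
  ∀ i a b : Nat, dpGet DP i a b = -1 ∨ dpGet DP i a b = F (T.drop i) (↑a) (↑b)

lemma getD_set_eq_ite {α : Type} (l : List α) (i j : Nat) (x d : α) :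
    (l.set i x).getD j d = if i = j ∧ i < l.length then x else l.getD j d := by
  by_cases h : i = j ∧ i < l.length
  · obtain ⟨rfl, hl⟩ := h
    simp [List.getD_eq_getElem?_getD, List.getElem?_set, hl]
  · rw [if_neg h]
    by_cases hij : i = j
    · have hl : ¬ i < l.length := fun hh => h ⟨hij, hh⟩
      subst hij
      have hn : l[i]? = none := by rw [List.getElem?_eq_none_iff]; omega
      simp [List.getD_eq_getElem?_getD, List.getElem?_set, hl, hn]
    · simp [List.getD_eq_getElem?_getD, List.getElem?_set, hij]

lemma dpGet_dpSet (DP : List (List (List Int))) (i a b : Nat) (v : Int)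
    (i' a' b' : Nat) :
    dpGet (dpSet DP i a b v) i' a' b' = dpGet DP i' a' b' ∨
    (i' = i ∧ a' = a ∧ b' = b ∧ dpGet (dpSet DP i a b v) i' a' b' = v) := by
  unfold dpGet dpSet
  rw [getD_set_eq_ite]
  split_ifs with h1
  · obtain ⟨hi, _⟩ := h1
    subst hi
    rw [getD_set_eq_ite]
    split_ifs with h2
    · obtain ⟨ha, _⟩ := h2
      subst ha
      rw [getD_set_eq_ite]
      split_ifs with h3
      · exact Or.inr ⟨rfl, rfl, h3.1.symm, rfl⟩
      · exact Or.inl rfl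
    · exact Or.inl rfl
  · exact Or.inl rfl

lemma Coh_dpSet {T : List Int} {DP : List (List (List Int))} {i a b : Nat} {v : Int}
    (h : Coh T DP) (hv : v = F (T.drop i) (↑a) (↑b)) : Coh T (dpSet DP i a b v) := by
  intro i' a' b'
  rcases dpGet_dpSet DP i a b v i' a' b' with heq | ⟨hi, ha, hb, heq⟩
  · rw [heq]; exact h i' a' b'
  · subst hi ha hb; rw [heq, hv]; right; rfl

-- B's layer tower, abstractly: Lay g d rest is the DP layer for the suffix rest
def Lay (g d : Int) : List Int → List (List Int)
  | [] => List.replicate (g+1).toNat (List.replicate (d+1).toNat 0)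
  | p :: r => layerB p g d (Lay g d r)

lemma getD_of_drop {T rest : List Int} {i : Nat} {p : Int}
    (h : T.drop i = p :: rest) : T.getD i 0 = p := by
  have h0 : (T.drop i)[0]? = T[i + 0]? := List.getElem?_drop
  rw [h] at h0
  simp only [List.getElem?_cons_zero, Nat.add_zero] at h0
  simp [List.getD_eq_getElem?_getD, ← h0]

lemma lget2_Lay (g d : Int) (hg : 0 ≤ g) (hd : 0 ≤ d) :
    ∀ (rest : List Int), (∀ p ∈ rest, 0 ≤ p) →
    ∀ (l1 l2 : Int), 0 ≤ l1 → l1 ≤ g → 0 ≤ l2 → l2 ≤ d →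
    lget2 (Lay g d rest) l1 l2 = F rest l1 l2 := by
  intro rest
  induction rest with
  | nil =>
    intro _ l1 l2 h1 h1' h2 h2'
    have hb1 : l1.toNat < (g+1).toNat := by omega
    have hb2 : l2.toNat < (d+1).toNat := by omega
    simp only [Lay, lget2, F]
    rw [List.getD_replicate _ hb1, List.getD_replicate _ hb2]
  | cons p r ih =>
    intro hnn l1 l2 h1 h1' h2 h2'
    have hp : 0 ≤ p := hnn p List.mem_cons_self
    have hr : ∀ q ∈ r, 0 ≤ q := fun q hq => hnn q (List.mem_cons_of_mem _ hq)
    have hb1 : l1.toNat < (g+1).toNat := by omega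
    have hb2 : l2.toNat < (d+1).toNat := by omega
    simp only [Lay, lget2, layerB]
    rw [PySem.List.getD_map_range _ _ _ _ hb1, PySem.List.getD_map_range _ _ _ _ hb2]
    have e1 : ((l1.toNat : Int)) = l1 := Int.toNat_of_nonneg h1
    have e2 : ((l2.toNat : Int)) = l2 := Int.toNat_of_nonneg h2
    rw [show (cellB p (Int.ofNat l1.toNat) (Int.ofNat l2.toNat) (Lay g d r)) = cellB p l1 l2 (Lay g d r) by simp only [Int.ofNat_eq_natCast]; rw [e1, e2]]
    unfold cellB
    by_cases c1 : p ≤ l1 <;> by_cases c2 : p ≤ l2 <;>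
      simp only [c1, c2, if_true, if_false, ite_true, ite_false]
    · -- both fit
      have hF : F (p :: r) l1 l2 = max (F r (l1 - p) l2) (F r l1 (l2 - p)) + 1 := by
        rw [F, if_neg (by omega), if_neg (by omega), if_neg (by omega)]
      rw [ih hr (l1 - p) l2 (by omega) (by omega) h2 h2',
          ih hr l1 (l2 - p) h1 h1' (by omega) (by omega), hF]
      by_cases h : F r l1 (l2 - p) ≤ F r (l1 - p) l2
      · rw [if_neg (by omega), max_eq_left h]
      · rw [if_pos (by omega), max_eq_right (by omega)]
    · -- p ≤ l1, p > l2
      rw [ih hr (l1 - p) l2 (by omega) (by omega) h2 h2']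
      rw [F, if_neg (by omega), if_neg (by omega), if_pos (by omega)]
    · -- p > l1, p ≤ l2
      rw [ih hr l1 (l2 - p) h1 h1' (by omega) (by omega)]
      have := F_nonneg r l1 (l2 - p)
      rw [if_pos (by omega)]
      rw [F, if_neg (by omega), if_pos (by omega)]
    · rw [F, if_pos (by omega)]

lemma fA_ok (T : List Int) (hT : ∀ p ∈ T, 0 ≤ p) :
    ∀ (rest : List Int) (fuel iN : Nat) (DP : List (List (List Int))) (l1 l2 : Int),
    T.drop iN = rest → rest.length < fuel → 0 ≤ l1 → 0 ≤ l2 → Coh T DP →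
    (fA T fuel DP (↑iN) l1 l2).2 = F rest l1 l2 ∧ Coh T (fA T fuel DP (↑iN) l1 l2).1 := by
  intro rest
  induction rest with
  | nil =>
    intro fuel iN DP l1 l2 hdrop hfuel h1 h2 hC
    obtain ⟨fuel', rfl⟩ : ∃ f', fuel = f' + 1 := ⟨fuel - 1, by omega⟩
    have hlen : T.length ≤ iN := List.drop_eq_nil_iff.mp hdrop
    have hc : (↑iN : Int) > (T.length : Int) - 1 := by
      push_cast; omega
    simp only [fA, if_pos hc]
    exact ⟨rfl, hC⟩
  | cons p r ih =>
    intro fuel iN DP l1 l2 hdrop hfuel h1 h2 hC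
    obtain ⟨fuel', rfl⟩ : ∃ f', fuel = f' + 1 := ⟨fuel - 1, by omega⟩
    have hlt : iN < T.length := by
      by_contra hh
      rw [List.drop_eq_nil_iff.mpr (by omega)] at hdrop
      simp at hdrop
    have hc : ¬ ((↑iN : Int) > (T.length : Int) - 1) := by push_cast; omega
    have hTi : T.getD (↑iN : Int).toNat 0 = p := by
      rw [Int.toNat_natCast]; exact getD_of_drop hdrop
    have hp : 0 ≤ p := hT p (List.mem_of_mem_drop (hdrop ▸ List.mem_cons_self))
    have hdrop' : T.drop (iN + 1) = r := by
      have : T.drop (iN + 1) = (T.drop iN).drop 1 := by rw [List.drop_drop]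
      rw [this, hdrop]; rfl
    have hcast : ((↑iN : Int) + 1) = ↑(iN + 1) := by push_cast; ring
    have hFrw : F (T.drop iN) (↑l1.toNat) (↑l2.toNat) = F (p :: r) l1 l2 := by
      rw [hdrop, Int.toNat_of_nonneg h1, Int.toNat_of_nonneg h2]
    simp only [fA, if_neg hc]
    by_cases hm : dpGet DP (↑iN : Int).toNat l1.toNat l2.toNat ≠ -1
    · rw [if_pos hm]
      refine ⟨?_, hC⟩
      rcases hC iN l1.toNat l2.toNat with h | h
      · rw [Int.toNat_natCast] at hm; exact absurd h hm
      · rw [Int.toNat_natCast, h, hFrw]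
    · rw [if_neg hm]
      rw [hTi]
      by_cases ha : p > l1 ∧ p > l2
      · rw [if_pos ha]
        refine ⟨by rw [F, if_pos ha], ?_⟩
        refine Coh_dpSet hC ?_
        rw [Int.toNat_natCast, hFrw, F, if_pos ha]
      · rw [if_neg ha]
        by_cases hb : p > l1
        · rw [if_pos hb]
          have h2' : 0 ≤ l2 - p := by omega
          rw [hcast]
          obtain ⟨hv, hC'⟩ := ih fuel' (iN+1) DP l1 (l2 - p) hdrop' (by simp at hfuel ⊢; omega) h1 h2' hC
          refine ⟨by rw [hv, F, if_neg ha, if_pos hb], ?_⟩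
          refine Coh_dpSet hC' ?_
          rw [Int.toNat_natCast, hdrop, Int.toNat_of_nonneg h1, Int.toNat_of_nonneg h2,
            F, if_neg ha, if_pos hb, hv]
        · rw [if_neg hb]
          by_cases hd : p > l2
          · rw [if_pos hd]
            have h1' : 0 ≤ l1 - p := by omega
            rw [hcast]
            obtain ⟨hv, hC'⟩ := ih fuel' (iN+1) DP (l1 - p) l2 hdrop' (by simp at hfuel ⊢; omega) h1' h2 hC
            refine ⟨by rw [hv, F, if_neg ha, if_neg hb, if_pos hd], ?_⟩
            refine Coh_dpSet hC' ?_
            rw [Int.toNat_natCast, hdrop, Int.toNat_of_nonneg h1, Int.toNat_of_nonneg h2,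
              F, if_neg ha, if_neg hb, if_pos hd, hv]
          · rw [if_neg hd]
            have h1' : 0 ≤ l1 - p := by omega
            have h2' : 0 ≤ l2 - p := by omega
            rw [hcast]
            obtain ⟨hv1, hC1⟩ := ih fuel' (iN+1) DP (l1 - p) l2 hdrop' (by simp at hfuel ⊢; omega) h1' h2 hC
            obtain ⟨hv2, hC2⟩ := ih fuel' (iN+1) (fA T fuel' DP (↑(iN+1)) (l1 - p) l2).1 l1 (l2 - p) hdrop' (by simp at hfuel ⊢; omega) h1 h2' hC1
            refine ⟨by rw [hv1, hv2, F, if_neg ha, if_neg hb, if_neg hd], ?_⟩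
            refine Coh_dpSet hC2 ?_
            rw [Int.toNat_natCast, hdrop, Int.toNat_of_nonneg h1, Int.toNat_of_nonneg h2,
              F, if_neg ha, if_neg hb, if_neg hd, hv1, hv2]

lemma layers_headD (g d : Int) (P : List Int) :
    (P.foldr (fun p ls => layerB p g d (ls.headD []) :: ls)
      [List.replicate (g+1).toNat (List.replicate (d+1).toNat 0)]).headD [] = Lay g d P := by
  induction P with
  | nil => rfl
  | cons p r ih => simp only [List.foldr_cons, List.headD_cons, Lay, ih]

lemma layers_getD (g d : Int) (P : List Int) :
    ∀ j : Nat, j ≤ P.length →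
    (P.foldr (fun p ls => layerB p g d (ls.headD []) :: ls)
      [List.replicate (g+1).toNat (List.replicate (d+1).toNat 0)]).getD j [] =
      Lay g d (P.drop j) := by
  induction P with
  | nil =>
    intro j hj
    have hz : j = 0 := by simpa using hj
    subst hz
    rfl
  | cons p r ih =>
    intro j hj
    cases j with
    | zero =>
      simp only [List.foldr_cons, List.getD_cons_zero, List.drop_zero, Lay]
      rw [layers_headD]
    | succ j' =>
      simp only [List.foldr_cons, List.getD_cons_succ, List.drop_succ_cons]
      exact ih j' (by simpa using hj)

lemma Coh_init (P : List Int) (g d : Int) :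
    Coh P (List.replicate P.length
      (List.replicate (g+1).toNat (List.replicate (d+1).toNat (-1)))) := by
  intro i a b
  left
  simp only [dpGet, List.getD_eq_getElem?_getD, List.getElem?_replicate]
  split_ifs <;> simp [List.getElem?_replicate] <;> split_ifs <;>
    simp [List.getElem?_replicate] <;> split_ifs <;> simp

lemma recon_eq (P : List Int) (g d : Int) (hg : 0 ≤ g) (hd : 0 ≤ d)
    (hP : ∀ p ∈ P, 0 ≤ p) :
    ∀ (k iN : Nat) (l1 l2 : Int) (sol sol2 : List Int) (DP : List (List (List Int))),
    Coh P DP → 0 ≤ l1 → l1 ≤ g → 0 ≤ l2 → l2 ≤ d →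
    reconA P k DP (↑iN) l1 l2 sol sol2 =
      reconB P (P.foldr (fun p ls => layerB p g d (ls.headD []) :: ls)
        [List.replicate (g+1).toNat (List.replicate (d+1).toNat 0)]) k (↑iN) l1 l2 sol sol2 := by
  intro k
  induction k with
  | zero => intro iN l1 l2 sol sol2 DP _ _ _ _ _; rfl
  | succ k ih =>
    intro iN l1 l2 sol sol2 DP hC h1 h1' h2 h2'
    simp only [reconA, reconB, Int.toNat_natCast]
    set p := P.getD iN 0 with hpdef
    by_cases hcond : (↑iN : Int) < (P.length : Int) ∧ (l1 ≥ p ∨ l2 ≥ p)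
    · rw [if_pos hcond, if_pos hcond]
      have hiN : iN < P.length := by exact_mod_cast hcond.1
      have hpmem : p ∈ P := by
        rw [hpdef, List.getD_eq_getElem?_getD, List.getElem?_eq_getElem hiN]
        exact List.getElem_mem hiN
      have hp : 0 ≤ p := hP p hpmem
      have hdropsuffix : ∀ q ∈ P.drop (iN + 1), 0 ≤ q := fun q hq => hP q (List.mem_of_mem_drop hq)
      have hnx : (P.foldr (fun p ls => layerB p g d (ls.headD []) :: ls)
          [List.replicate (g+1).toNat (List.replicate (d+1).toNat 0)]).getD (iN + 1) [] =
          Lay g d (P.drop (iN + 1)) := layers_getD g d P (iN + 1) (by omega)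
      have hcast : ((↑iN : Int) + 1) = ((↑(iN + 1) : Int)) := by push_cast; ring
      rw [hnx]
      by_cases hA1 : p > l1 ∧ p > l2
      · exfalso; rcases hcond.2 with h | h <;> omega
      · by_cases hA2 : p > l1
        · -- p > l1, p ≤ l2 : both go to sol2
          have hple : p ≤ l2 := by rcases hcond.2 with h | h <;> omega
          rw [if_neg hA1, if_pos hA2]
          rw [if_neg (show ¬((0:Int) > 1) by omega)]
          rw [if_neg (show ¬(p ≤ l1) by omega), if_pos hple]
          rw [lget2_Lay g d hg hd _ hdropsuffix l1 (l2 - p) h1 h1' (by omega) (by omega)]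
          have := F_nonneg (P.drop (iN + 1)) l1 (l2 - p)
          rw [if_neg (show ¬((0:Int) > F (P.drop (iN + 1)) l1 (l2 - p) + 1) by omega)]
          rw [hcast]
          exact ih (iN + 1) l1 (l2 - p) sol (sol2 ++ [(↑iN : Int)]) DP hC h1 h1' (by omega) (by omega)
        · by_cases hA3 : p > l2
          · -- p ≤ l1, p > l2 : both go to sol
            rw [if_neg hA1, if_neg hA2, if_pos hA3]
            rw [if_pos (show (1:Int) > 0 by omega)]
            rw [if_pos (show p ≤ l1 by omega), if_neg (show ¬(p ≤ l2) by omega)]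
            rw [lget2_Lay g d hg hd _ hdropsuffix (l1 - p) l2 (by omega) (by omega) h2 h2']
            have := F_nonneg (P.drop (iN + 1)) (l1 - p) l2
            rw [if_pos (show F (P.drop (iN + 1)) (l1 - p) l2 + 1 > 0 by omega)]
            rw [hcast]
            exact ih (iN + 1) (l1 - p) l2 (sol ++ [(↑iN : Int)]) sol2 DP hC (by omega) (by omega) h2 h2'
          · -- both fit
            rw [if_neg hA1, if_neg hA2, if_neg hA3]
            rw [if_pos (show p ≤ l1 by omega), if_pos (show p ≤ l2 by omega)]
            have hfuel : (P.drop (iN + 1)).length < P.length + 1 := by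
              rw [List.length_drop]; omega
            obtain ⟨hv1, hC1⟩ := by
              have := fA_ok P hP (P.drop (iN + 1)) (P.length + 1) (iN + 1) DP (l1 - p) l2
                rfl hfuel (by omega) h2 hC
              rw [← hcast] at this
              exact this
            obtain ⟨hv2, hC2⟩ := by
              have := fA_ok P hP (P.drop (iN + 1)) (P.length + 1) (iN + 1)
                (fA P (P.length + 1) DP ((↑iN : Int) + 1) (l1 - p) l2).1 l1 (l2 - p)
                rfl hfuel h1 (by omega) (by rw [hcast]; exact hC1)
              rw [← hcast] at this
              exact this
            rw [lget2_Lay g d hg hd _ hdropsuffix (l1 - p) l2 (by omega) (by omega) h2 h2']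
            rw [lget2_Lay g d hg hd _ hdropsuffix l1 (l2 - p) h1 h1' (by omega) (by omega)]
            rw [hv1, hv2]
            by_cases hcmp : F (P.drop (iN + 1)) (l1 - p) l2 > F (P.drop (iN + 1)) l1 (l2 - p)
            · rw [if_pos hcmp, if_pos (by omega), hcast]
              exact ih (iN + 1) (l1 - p) l2 (sol ++ [(↑iN : Int)]) sol2 _ hC2 (by omega) (by omega) h2 h2'
            · rw [if_neg hcmp, if_neg (by omega), hcast]
              exact ih (iN + 1) l1 (l2 - p) sol (sol2 ++ [(↑iN : Int)]) _ hC2 h1 h1' (by omega) (by omega)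
    · rw [if_neg hcond, if_neg hcond]

-- ===== VERDICT (by name: the statement is the Claim_ definition above) =====
theorem prom_spec : Claim_equal_prom := by
  intro P g d _hdom hpre
  obtain ⟨hg, hd, hP⟩ := hpre
  show prom P g d = prom_alt P g d
  simp only [prom, prom_alt]
  have hC0 := Coh_init P g d
  have hfa := fA_ok P hP P (P.length + 1) 0
    (List.replicate P.length (List.replicate (g+1).toNat (List.replicate (d+1).toNat (-1))))
    g d (by simp) (by omega) hg hd hC0
  rw [Nat.cast_zero] at hfa
  have hw2 : lget2 ((P.foldr (fun p ls => layerB p g d (ls.headD []) :: ls)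
      [List.replicate (g+1).toNat (List.replicate (d+1).toNat 0)]).headD []) g d = F P g d := by
    rw [layers_headD]
    exact lget2_Lay g d hg hd P hP g d hg le_rfl hd le_rfl
  have hrec := recon_eq P g d hg hd hP P.length 0 g d [] [] _ hfa.2 hg le_rfl hd le_rfl
  rw [Nat.cast_zero] at hrec
  rw [hfa.1, hw2, hrec]
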